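-- pv_equiv track=rewrite | github.com/JENiN2/population_data | world_population.py | group_countries
-- ===== SOURCE A (Python) =====
-- def group_countries(cc_populations):
--     # Круппировка стран по 3 уровням населения.
--     cc_pops_1, cc_pops_2, cc_pops_3 = {}, {}, {}
--     for cc, pop in cc_populations.items():
--         if pop < 10000000:
--             cc_pops_1[cc] = pop
--         elif pop < 1000000000:
--             cc_pops_2[cc] = pop
--         elif pop > 1000000000:
--             cc_pops_3[cc] = pop
--     cc_pop_list = cc_pops_1, cc_pops_2, cc_pops_3
--     return cc_pop_list
-- ===== SOURCE B (Python) =====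
-- def group_countries(cc_populations):
--     # Same grouping done idiomatically: three independent dict comprehensions,
--     # one per population bucket (pop == 10**9 is dropped from all three, as in A).
--     items = cc_populations.items()
--     cc_pops_1 = {cc: pop for cc, pop in items if pop < 10000000}
--     cc_pops_2 = {cc: pop for cc, pop in items if 10000000 <= pop < 1000000000}
--     cc_pops_3 = {cc: pop for cc, pop in items if pop > 1000000000}
--     return cc_pops_1, cc_pops_2, cc_pops_3
-- ===== Notes on version B (the rewrite author's own statement) =====
-- stated objective: idiomatic
-- what changed: Replaces the single mutually-exclusive if/elif pass that mutates three dicts with three independent dict comprehensions, one filtering pass per bucket (the 10**9 boundary is still dropped from every bucket).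
import Mathlib
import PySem

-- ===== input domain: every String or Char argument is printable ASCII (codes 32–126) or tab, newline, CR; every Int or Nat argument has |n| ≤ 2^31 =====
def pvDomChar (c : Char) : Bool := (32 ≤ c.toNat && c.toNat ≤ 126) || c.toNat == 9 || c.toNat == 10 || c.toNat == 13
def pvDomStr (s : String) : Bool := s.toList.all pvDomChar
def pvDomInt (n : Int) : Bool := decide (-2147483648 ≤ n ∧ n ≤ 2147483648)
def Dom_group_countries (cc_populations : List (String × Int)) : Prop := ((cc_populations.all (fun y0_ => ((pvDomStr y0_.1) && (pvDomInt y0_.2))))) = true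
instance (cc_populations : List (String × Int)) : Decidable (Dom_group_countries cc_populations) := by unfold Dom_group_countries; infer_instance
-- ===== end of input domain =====

-- B replaces A's single mutually-exclusive if/elif pass over the dict by three
-- independent filtering passes (dict comprehensions), one per bucket; same values.


-- ===== PORT A =====
-- One pass over items(); `d[cc] = pop` appends, exact here because the argument is a
-- Python dict so its keys are pairwise distinct (each bucket key is always fresh).
def group_countries (cc_populations : List (String × Int)) : (List (String × Int)) × (List (String × Int)) × (List (String × Int)) :=
  let r := cc_populations.foldl
    (fun (acc : (List (String × Int)) × (List (String × Int)) × (List (String × Int))) p =>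
      if p.2 < 10000000 then (acc.1 ++ [p], acc.2.1, acc.2.2)
      else if p.2 < 1000000000 then (acc.1, acc.2.1 ++ [p], acc.2.2)
      else if p.2 > 1000000000 then (acc.1, acc.2.1, acc.2.2 ++ [p])
      else acc)
    ([], [], [])
  r

-- ===== PORT B =====
-- Three independent dict comprehensions = three filters of items() (keys distinct).
def group_countries_alt (cc_populations : List (String × Int)) : (List (String × Int)) × (List (String × Int)) × (List (String × Int)) :=
  (cc_populations.filter (fun p => p.2 < 10000000),
   cc_populations.filter (fun p => 10000000 ≤ p.2 ∧ p.2 < 1000000000),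
   cc_populations.filter (fun p => p.2 > 1000000000))

-- ===== PRECONDITION & SPEC =====
def Spec_group_countries (cc_populations : List (String × Int)) (out : (List (String × Int)) × (List (String × Int)) × (List (String × Int))) : Prop := out = group_countries_alt cc_populations
instance (cc_populations : List (String × Int)) (out : (List (String × Int)) × (List (String × Int)) × (List (String × Int))) : Decidable (Spec_group_countries cc_populations out) := by unfold Spec_group_countries; infer_instance

-- ===== CLAIM (what is proved, stated in full; the proofs are below) =====
def Claim_equal_group_countries : Prop := ∀ (cc_populations : List (String × Int)), Dom_group_countries cc_populations → Spec_group_countries cc_populations (group_countries cc_populations)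

-- ===== LEMMAS AND PROOFS =====
theorem group_countries_foldl (l : List (String × Int))
    (a b c : List (String × Int)) :
    l.foldl
      (fun (acc : (List (String × Int)) × (List (String × Int)) × (List (String × Int))) p =>
        if p.2 < 10000000 then (acc.1 ++ [p], acc.2.1, acc.2.2)
        else if p.2 < 1000000000 then (acc.1, acc.2.1 ++ [p], acc.2.2)
        else if p.2 > 1000000000 then (acc.1, acc.2.1, acc.2.2 ++ [p])
        else acc)
      (a, b, c)
    = (a ++ l.filter (fun p => p.2 < 10000000),
       b ++ l.filter (fun p => 10000000 ≤ p.2 ∧ p.2 < 1000000000),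
       c ++ l.filter (fun p => p.2 > 1000000000)) := by
  induction l generalizing a b c with
  | nil => simp
  | cons p t ih =>
    simp only [List.foldl_cons, List.filter_cons]
    by_cases h1 : p.2 < 10000000
    · simp [h1, ih, show ¬(10000000 ≤ p.2 ∧ p.2 < 1000000000) by omega,
            show ¬(p.2 > 1000000000) by omega]
    · by_cases h2 : p.2 < 1000000000
      · simp [h1, h2, ih, show (10000000 ≤ p.2 ∧ p.2 < 1000000000) by omega,
              show ¬(p.2 > 1000000000) by omega]
      · by_cases h3 : p.2 > 1000000000
        · simp [h1, h2, h3, ih]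
        · simp [h1, h2, h3, ih]

-- ===== VERDICT (by name: the statement is the Claim_ definition above) =====
theorem group_countries_spec : Claim_equal_group_countries := by
  intro l _
  show group_countries l = group_countries_alt l
  simp [group_countries, group_countries_alt, group_countries_foldl]
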